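-- pv_equiv track=rewrite | github.com/Linkit-CST499-SP23/CST-499-Capstone-Project-SP23---LinkIt | LinkIt/plugins/CreditCardNumberPlugin.py | remove_delimiters
-- ===== SOURCE A (Python) =====
-- def remove_delimiters(col):
--     delimiters = [" ", "-", "."]
--     new_col = []
--
--     for string in col:
--         new_str = string.strip()
--         for i in delimiters:  # replace each delimiter in turn with a space
--             new_str = new_str.replace(i, '')
--         new_col.append(new_str)
--
--     return new_col
-- ===== SOURCE B (Python) =====
-- def remove_delimiters(col):
--     delims = {" ", "-", "."}
--     return ["".join(ch for ch in s.strip() if ch not in delims) for s in col]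
-- ===== Notes on version B (the rewrite author's own statement) =====
-- stated objective: idiomatic
-- what changed: Replaces the explicit accumulator loop with three sequential full-string replace() scans per string by a list comprehension doing one character-level filtering pass over each stripped string against the delimiter set.
import Mathlib
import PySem

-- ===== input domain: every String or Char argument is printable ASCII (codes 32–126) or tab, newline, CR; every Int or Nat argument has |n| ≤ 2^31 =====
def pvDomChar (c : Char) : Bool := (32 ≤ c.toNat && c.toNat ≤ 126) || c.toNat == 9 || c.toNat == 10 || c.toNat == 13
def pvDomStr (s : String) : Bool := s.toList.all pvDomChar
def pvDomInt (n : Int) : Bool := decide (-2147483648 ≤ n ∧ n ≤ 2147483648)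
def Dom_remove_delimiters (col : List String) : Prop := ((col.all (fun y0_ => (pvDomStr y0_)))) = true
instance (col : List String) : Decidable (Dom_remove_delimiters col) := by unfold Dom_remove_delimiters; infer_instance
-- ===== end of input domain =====

-- B replaces A's three sequential full-string replace() scans per string by one
-- character-level filtering pass over the stripped string (idiomatic comprehension).

-- ===== PORT A =====
-- for string in col: new_str = string.strip(); for i in delimiters: new_str = new_str.replace(i, ''); new_col.append(new_str)
def remove_delimiters (col : List String) : List String :=
  col.foldl (fun new_col string =>
    new_col ++ [[" ", "-", "."].foldl (fun new_str i => PySem.Str.replace new_str i "") (PySem.Str.strip string)]) []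

-- ===== PORT B =====
-- return ["".join(ch for ch in s.strip() if ch not in delims) for s in col]
def remove_delimiters_alt (col : List String) : List String :=
  col.map (fun s =>
    String.ofList ((PySem.Str.strip s).toList.filter (fun ch => !(ch == ' ' || ch == '-' || ch == '.'))))

-- ===== PRECONDITION & SPEC =====
def Spec_remove_delimiters (col : List String) (out : List String) : Prop := out = remove_delimiters_alt col
instance (col : List String) (out : List String) : Decidable (Spec_remove_delimiters col out) := by unfold Spec_remove_delimiters; infer_instance

-- ===== CLAIM (what is proved, stated in full; the proofs are below) =====
def Claim_equal_remove_delimiters : Prop := ∀ (col : List String), Dom_remove_delimiters col → Spec_remove_delimiters col (remove_delimiters col)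

-- ===== LEMMAS AND PROOFS =====

-- replace.go with a single-char pattern and empty replacement is a filter
lemma replace_go_single (c : Char) : ∀ (fuel : Nat) (l acc : List Char), l.length ≤ fuel →
    PySem.Chars.replace.go [c] [] fuel l acc = acc.reverse ++ l.filter (fun x => x != c) := by
  intro fuel
  induction fuel with
  | zero =>
    intro l acc h
    have : l = [] := List.eq_nil_of_length_eq_zero (Nat.le_zero.mp h)
    subst this
    simp [PySem.Chars.replace.go]
  | succ n ih =>
    intro l acc h
    cases l with
    | nil => simp [PySem.Chars.replace.go]
    | cons c' t =>
      simp only [PySem.Chars.replace.go]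
      by_cases hc : c = c'
      · subst hc
        have hp : [c].isPrefixOf (c :: t) = true := by simp [List.isPrefixOf]
        rw [if_pos hp]
        simp only [List.length, List.drop_succ_cons, List.drop_zero, List.reverse_nil,
          List.nil_append]
        rw [ih t acc (by simpa using Nat.lt_succ_iff.mp (by simpa using h))]
        simp [List.filter]
      · have hp : [c].isPrefixOf (c' :: t) = false := by
          simp [List.isPrefixOf]
          exact hc
        rw [if_neg (by simp [hp])]
        rw [ih t (c' :: acc) (by simpa using Nat.lt_succ_iff.mp (by simpa using h))]
        have hb : (c' != c) = true := by
          simp [bne]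
          exact fun h' => hc h'.symm
        simp [List.filter, hb]

lemma replace_single (c : Char) (l : List Char) :
    PySem.Chars.replace l [c] [] = l.filter (fun x => x != c) := by
  have h := replace_go_single c l.length l [] (le_refl _)
  simpa [PySem.Chars.replace] using h

lemma per_string (s : String) :
    [" ", "-", "."].foldl (fun new_str i => PySem.Str.replace new_str i "") (PySem.Str.strip s)
    = String.ofList ((PySem.Str.strip s).toList.filter (fun ch => !(ch == ' ' || ch == '-' || ch == '.'))) := by
  apply String.ext
  simp only [List.foldl]
  simp [PySem.Str.replace, replace_single, List.filter_filter]
  apply List.filter_congr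
  intro x _
  by_cases h1 : x = ' ' <;> by_cases h2 : x = '-' <;> by_cases h3 : x = '.' <;> simp [bne, h1, h2, h3] <;> try ac_rfl

-- A's foldl-append loop produces the map
lemma foldl_append_map (col : List String) (acc : List String) :
    col.foldl (fun new_col string =>
      new_col ++ [[" ", "-", "."].foldl (fun new_str i => PySem.Str.replace new_str i "") (PySem.Str.strip string)]) acc
    = acc ++ col.map (fun s =>
        String.ofList ((PySem.Str.strip s).toList.filter (fun ch => !(ch == ' ' || ch == '-' || ch == '.')))) := by
  induction col generalizing acc with
  | nil => simp
  | cons s t ih =>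
    rw [List.foldl_cons, ih, per_string]
    simp

-- ===== VERDICT (by name: the statement is the Claim_ definition above) =====
theorem remove_delimiters_spec : Claim_equal_remove_delimiters := by
  intro col _
  unfold Spec_remove_delimiters remove_delimiters remove_delimiters_alt
  simpa using foldl_append_map col []
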